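-- pv_equiv track=rewrite | github.com/agenthubdev/agenthub_operators | operators/define_openai_function.py | parse_parameter_structures
-- ===== SOURCE A (Python) =====
-- def parse_parameter_structures(parameter_structures):
--     parameters_dict = {}
--
--     for parameter in parameter_structures:
--         # Each item is a dictionary with one entry, iterate over this entry
--         for attribute, value in parameter.items():
--             # Split the key by the "-" character
--             # This separates the attribute name (name, type, or description) and the parameter index
--             indexed_attribute = attribute.split("-")
--             param_index = indexed_attribute[1]
--             param_attribute = indexed_attribute[0]
--
--             if param_index not in parameters_dict:
--                 parameters_dict[param_index] = {}
--
--             # Add the attribute to the dictionary for this parameter index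
--             parameters_dict[param_index][param_attribute] = value
--
--     return parameters_dict
-- ===== SOURCE B (Python) =====
-- def parse_parameter_structures(parameter_structures):
--     # Flatten into (index, attribute, value) triples, then group them per index.
--     triples = []
--     for parameter in parameter_structures:
--         for attribute, value in parameter.items():
--             parts = attribute.split("-")
--             triples.append((parts[1], parts[0], value))
--     result = {}
--     for idx in dict.fromkeys(t[0] for t in triples):
--         inner = {}
--         for i, attr, val in triples:
--             if i == idx:
--                 inner[attr] = val
--         result[idx] = inner
--     return result
-- ===== Notes on version B (the rewrite author's own statement) =====
-- stated objective: alternative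
-- what changed: A builds the nested dict online in one pass with membership checks and in-place updates; B first flattens the input into (index, attribute, value) triples, then computes the ordered distinct indices with dict.fromkeys and builds each index's inner dict by a filtered scan of the triples.
import Mathlib
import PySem

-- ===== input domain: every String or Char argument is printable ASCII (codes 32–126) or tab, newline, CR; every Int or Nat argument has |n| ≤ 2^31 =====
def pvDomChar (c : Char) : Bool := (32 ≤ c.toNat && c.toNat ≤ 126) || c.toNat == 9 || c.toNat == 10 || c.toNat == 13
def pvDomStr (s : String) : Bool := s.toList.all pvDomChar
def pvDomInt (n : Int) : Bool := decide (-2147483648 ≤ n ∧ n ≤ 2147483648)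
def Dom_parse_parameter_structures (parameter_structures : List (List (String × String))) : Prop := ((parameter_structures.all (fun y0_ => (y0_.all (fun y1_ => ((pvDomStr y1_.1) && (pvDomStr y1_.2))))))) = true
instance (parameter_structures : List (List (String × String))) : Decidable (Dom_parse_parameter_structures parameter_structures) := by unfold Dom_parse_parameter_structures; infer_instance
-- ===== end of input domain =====

-- B replaces A's online nested-dict building by flatten-into-triples then group-per-distinct-index
-- (objective: alternative decomposition, similar cost); equivalence is about the return value.

-- ===== PORT A =====
def parse_parameter_structures (parameter_structures : List (List (String × String))) : List (String × List (String × String)) :=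
  let parameters_dict : PySem.Dict String (PySem.Dict String String) :=
    parameter_structures.foldl (fun parameters_dict parameter =>
      parameter.foldl (fun parameters_dict av =>
        -- attribute.split("-"); the separator "-" is nonempty, so split? is always some
        let indexed_attribute := (PySem.Str.split? av.1 "-").getD []
        -- indexed_attribute[1] raises IndexError when the key has no "-": excluded by Pre_
        let param_index := PySem.List.pyGetD indexed_attribute 1 ""
        let param_attribute := PySem.List.pyGetD indexed_attribute 0 ""
        let parameters_dict :=
          if parameters_dict.contains param_index then parameters_dict
          else parameters_dict.insert param_index PySem.Dict.empty
        parameters_dict.modify param_index PySem.Dict.empty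
          (fun inner => inner.insert param_attribute av.2)) parameters_dict)
      PySem.Dict.empty
  parameters_dict.items.map (fun p => (p.1, p.2.items))

-- ===== PORT B =====
-- (parts[1], parts[0], value) for one (attribute, value) pair
def pvTriple (av : String × String) : String × String × String :=
  let parts := (PySem.Str.split? av.1 "-").getD []
  (PySem.List.pyGetD parts 1 "", PySem.List.pyGetD parts 0 "", av.2)

def parse_parameter_structures_alt (parameter_structures : List (List (String × String))) : List (String × List (String × String)) :=
  let triples : List (String × String × String) :=
    parameter_structures.foldl (fun ts parameter =>
      parameter.foldl (fun ts av => ts ++ [pvTriple av]) ts) []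
  let result : PySem.Dict String (PySem.Dict String String) :=
    (PySem.List.dedup (triples.map (·.1))).foldl (fun r idx =>
      r.insert idx (triples.foldl (fun inner t =>
        if t.1 == idx then inner.insert t.2.1 t.2.2 else inner) PySem.Dict.empty))
      PySem.Dict.empty
  result.items.map (fun p => (p.1, p.2.items))

-- ===== PRECONDITION & SPEC =====
-- Pre_ excludes exactly the inputs where some attribute key contains no "-": there Python A raises IndexError.
def Pre_parse_parameter_structures (parameter_structures : List (List (String × String))) : Prop :=
  ∀ parameter ∈ parameter_structures, ∀ av ∈ parameter, '-' ∈ (Prod.fst av).toList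
instance (parameter_structures : List (List (String × String))) : Decidable (Pre_parse_parameter_structures parameter_structures) := by unfold Pre_parse_parameter_structures; infer_instance
def pvWitness_parse_parameter_structures : (List (List (String × String))) :=
  [[("name-0", "x")], [("type-0", "int"), ("name-1", "y")]]

def Spec_parse_parameter_structures (parameter_structures : List (List (String × String))) (out : List (String × List (String × String))) : Prop := out = parse_parameter_structures_alt parameter_structures
instance (parameter_structures : List (List (String × String))) (out : List (String × List (String × String))) : Decidable (Spec_parse_parameter_structures parameter_structures out) := by unfold Spec_parse_parameter_structures; infer_instance

-- ===== CLAIM (what is proved, stated in full; the proofs are below) =====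
def Claim_equal_parse_parameter_structures : Prop := ∀ (parameter_structures : List (List (String × String))), Dom_parse_parameter_structures parameter_structures → Pre_parse_parameter_structures parameter_structures → Spec_parse_parameter_structures parameter_structures (parse_parameter_structures parameter_structures)

-- ===== LEMMAS AND PROOFS =====

-- the uniform step: A's conditional-insert-then-modify collapses to a single insert
def pvStep (d : PySem.Dict String (PySem.Dict String String)) (t : String × String × String) :
    PySem.Dict String (PySem.Dict String String) :=
  d.insert t.1 ((d.getD t.1 PySem.Dict.empty).insert t.2.1 t.2.2)

theorem pvStepA (d : PySem.Dict String (PySem.Dict String String)) (av : String × String) :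
    (let indexed_attribute := (PySem.Str.split? av.1 "-").getD []
     let param_index := PySem.List.pyGetD indexed_attribute 1 ""
     let param_attribute := PySem.List.pyGetD indexed_attribute 0 ""
     let d' := if d.contains param_index then d else d.insert param_index PySem.Dict.empty
     d'.modify param_index PySem.Dict.empty (fun inner => inner.insert param_attribute av.2))
    = pvStep d (pvTriple av) := by
  simp only [pvStep, pvTriple, PySem.Dict.modify]
  split_ifs with h
  · rfl
  · rw [PySem.Dict.getD_insert_self, PySem.Dict.insert_insert_self,
        PySem.Dict.getD_of_not_contains d _ (by simpa using h)]

-- the flattened-pair list a nested append loop builds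
theorem pvFlatBuild {α β : Type} (h : α → β) (ps : List (List α)) :
    ∀ acc : List β,
      ps.foldl (fun ts p => p.foldl (fun ts x => ts ++ [h x]) ts) acc
        = acc ++ (ps.flatMap id).map h := by
  induction ps with
  | nil => intro acc; simp
  | cons p ps ih =>
      intro acc
      rw [List.foldl_cons, PySem.List.foldl_append_singleton_eq_map h p acc,
        ih (acc ++ List.map h p)]
      simp

-- a nested fold over the pairs is the fold over the flattened pair list
theorem pvNestedFold {α δ : Type} (G : δ → α → δ) (ps : List (List α)) :
    ∀ d0 : δ,
      ps.foldl (fun d p => p.foldl G d) d0 = (ps.flatMap id).foldl G d0 := by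
  induction ps with
  | nil => intro d0; rfl
  | cons p ps ih => intro d0; simp [List.foldl_append, ih, id]

-- value at key i after folding pvStep: B's inner loop continued from the current value
theorem pvGetD_fold (L : List (String × String × String)) :
    ∀ (d : PySem.Dict String (PySem.Dict String String)) (i : String),
      (L.foldl pvStep d).getD i PySem.Dict.empty
        = L.foldl (fun inner t => if t.1 == i then inner.insert t.2.1 t.2.2 else inner)
            (d.getD i PySem.Dict.empty) := by
  induction L with
  | nil => intro d i; rfl
  | cons t L ih =>
      intro d i
      simp only [List.foldl_cons, ih]
      congr 1
      rw [pvStep, PySem.Dict.getD_insert]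
      by_cases h : t.1 = i
      · simp [h]
      · have h1 : ¬ (i = t.1) := fun hh => h hh.symm
        simp [h, h1]

theorem pvKeys_fold (L : List (String × String × String)) :
    (L.foldl pvStep PySem.Dict.empty).keys = PySem.List.dedup (L.map (·.1)) := by
  have h := PySem.Dict.keys_foldl_insert_key L (fun t => t.1)
      (fun d t => (d.getD t.1 PySem.Dict.empty).insert t.2.1 t.2.2) PySem.Dict.empty
  rw [PySem.List.dedup_eq_ofList, PySem.Set.ofList_eq_foldl]
  simpa [pvStep, PySem.Dict.keys_empty, PySem.Set.update] using h

theorem pvNodupKeys_fold (L : List (String × String × String)) :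
    (L.foldl pvStep PySem.Dict.empty).keys.Nodup := by
  have h := PySem.Dict.nodup_keys_foldl_insert_key L (fun t => t.1)
      (fun d t => (d.getD t.1 PySem.Dict.empty).insert t.2.1 t.2.2) PySem.Dict.empty
      PySem.Dict.nodup_keys_empty
  simpa [pvStep] using h

-- a dict with distinct keys is its key list paired with its values
theorem pvItems_eq_keys_map (d : PySem.Dict String (PySem.Dict String String))
    (h : d.keys.Nodup) :
    d.items = d.keys.map (fun k => (k, d.getD k PySem.Dict.empty)) := by
  simp only [PySem.Dict.keys, List.map_map]
  conv_lhs => rw [← List.map_id d.items]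
  refine List.map_congr_left fun p hp => ?_
  have := PySem.Dict.getD_of_mem_items d (k := p.1) (v := p.2) (by simpa using hp) h
      PySem.Dict.empty
  simp [Function.comp, this]

-- the two ports agree on every input
theorem pvMain (ps : List (List (String × String))) :
    parse_parameter_structures ps = parse_parameter_structures_alt ps := by
  unfold parse_parameter_structures parse_parameter_structures_alt
  have hlam : (fun (d : PySem.Dict String (PySem.Dict String String)) (av : String × String) =>
      (let indexed_attribute := (PySem.Str.split? av.1 "-").getD []
       let param_index := PySem.List.pyGetD indexed_attribute 1 ""
       let param_attribute := PySem.List.pyGetD indexed_attribute 0 ""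
       let d' := if d.contains param_index then d else d.insert param_index PySem.Dict.empty
       d'.modify param_index PySem.Dict.empty (fun inner => inner.insert param_attribute av.2)))
      = fun d av => pvStep d (pvTriple av) := funext fun d => funext fun av => pvStepA d av
  rw [hlam]
  set L : List (String × String × String) := (ps.flatMap id).map pvTriple with hL
  have htrip : ps.foldl (fun ts parameter =>
      parameter.foldl (fun ts av => ts ++ [pvTriple av]) ts) ([] : List (String × String × String)) = L := by
    rw [pvFlatBuild pvTriple ps []]; simp [hL]
  have hdict : ps.foldl (fun d parameter =>
      parameter.foldl (fun d av => pvStep d (pvTriple av)) d) PySem.Dict.empty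
      = L.foldl pvStep PySem.Dict.empty := by
    rw [pvNestedFold (fun d av => pvStep d (pvTriple av)) ps, hL, List.foldl_map]
  have hB : ((PySem.List.dedup (L.map (·.1))).foldl (fun r idx =>
      r.insert idx (L.foldl (fun inner t =>
        if t.1 == idx then inner.insert t.2.1 t.2.2 else inner) PySem.Dict.empty))
      PySem.Dict.empty).items
      = (PySem.List.dedup (L.map (·.1))).map (fun i => (i, L.foldl (fun inner t =>
          if t.1 == i then inner.insert t.2.1 t.2.2 else inner) PySem.Dict.empty)) := by
    have h := PySem.Dict.items_foldl_insert_fresh (PySem.List.dedup (L.map (·.1)))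
        (fun i => i)
        (fun i => L.foldl (fun inner t =>
          if t.1 == i then inner.insert t.2.1 t.2.2 else inner) PySem.Dict.empty)
        PySem.Dict.empty
        (fun a _ => PySem.Dict.contains_empty a)
        (by simp)
    simpa using h
  rw [htrip, hdict]
  simp only []  -- zeta-reduce the let-bindings
  rw [pvItems_eq_keys_map _ (pvNodupKeys_fold L), pvKeys_fold L, hB]
  simp only [List.map_map]
  refine List.map_congr_left fun i _ => ?_
  simp [Function.comp, pvGetD_fold L PySem.Dict.empty i, PySem.Dict.getD_empty]

-- ===== VERDICT (by name: the statement is the Claim_ definition above) =====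
theorem parse_parameter_structures_spec : Claim_equal_parse_parameter_structures := by
  intro ps _ _
  unfold Spec_parse_parameter_structures
  exact pvMain ps
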